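-- pv_equiv track=rewrite | github.com/Ashishkumar448/GFG-Problem-of-the-day | 2025-06-June-GFG-POTD/June 24 - Lexicographically Largest String After K Deletions/Solution.py | maxSubseq
-- ===== SOURCE A (Python) =====
-- def maxSubseq(s: str, k: int) -> str:
--     res = []
--     for char in s:
--         while k > 0 and res and res[-1] < char:
--             res.pop()
--             k -= 1
--         res.append(char)
--     if k > 0:
--         res = res[:-k]
--     return ''.join(res)
-- ===== SOURCE B (Python) =====
-- def maxSubseq(s: str, k: int) -> str:
--     n = len(s)
--     keep = n if k <= 0 else max(0, n - k)
--     out = []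
--     rest = s
--     while keep > 0:
--         window = rest[:len(rest) - keep + 1]
--         c = max(window)
--         i = window.index(c)
--         out.append(c)
--         rest = rest[i + 1:]
--         keep -= 1
--     return ''.join(out)
-- ===== Notes on version B (the rewrite author's own statement) =====
-- stated objective: alternative
-- what changed: Replaced A's monotonic pop-stack (push each char, popping smaller stack tops while deletions remain, then trimming leftover deletions) by a greedy selection that, for each of the keep = len(s)-k output slots, takes the leftmost maximum of the currently allowed window and restarts after it.
import Mathlib
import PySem

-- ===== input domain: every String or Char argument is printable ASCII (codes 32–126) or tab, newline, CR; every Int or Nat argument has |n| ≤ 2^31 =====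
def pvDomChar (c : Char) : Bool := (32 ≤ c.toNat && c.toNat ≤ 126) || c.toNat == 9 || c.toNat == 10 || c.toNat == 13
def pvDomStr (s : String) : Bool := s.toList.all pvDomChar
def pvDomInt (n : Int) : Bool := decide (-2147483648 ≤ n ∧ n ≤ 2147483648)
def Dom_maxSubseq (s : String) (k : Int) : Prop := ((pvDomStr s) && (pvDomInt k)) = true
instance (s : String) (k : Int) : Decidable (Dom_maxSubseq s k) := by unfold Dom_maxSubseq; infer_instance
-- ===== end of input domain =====

-- B replaces A's monotonic pop-stack by a greedy windowed leftmost-max selection (a genuinely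
-- different decomposition of the same result; not claimed faster).

-- ===== PORT A =====
-- the inner `while k > 0 and res and res[-1] < char: res.pop(); k -= 1` loop
def popW (res : List Char) (k : Int) (c : Char) : List Char × Int :=
  if 0 < k then
    match h : res.getLast? with
    | some x => if x < c then popW res.dropLast (k - 1) c else (res, k)
    | none => (res, k)
  else (res, k)
termination_by res.length
decreasing_by
  cases res with
  | nil => simp at h
  | cons a t => simp [List.length_dropLast]

-- the `for char in s` loop over (res, k)
def loopA (res : List Char) (k : Int) (l : List Char) : List Char × Int :=
  match l with
  | [] => (res, k)
  | c :: cs =>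
    let p := popW res k c
    loopA (p.1 ++ [c]) p.2 cs

def maxSubseq (s : String) (k : Int) : String :=
  let p := loopA [] k s.toList
  let res := if 0 < p.2 then PySem.List.slice p.1 none (some (-p.2)) else p.1
  String.ofList res

-- ===== PORT B =====
-- the `while keep > 0` loop: window = rest[:len(rest)-keep+1]; c = max(window); i = window.index(c)
def altLoop (rest : List Char) (keep : Nat) : List Char :=
  match keep with
  | 0 => []
  | m + 1 =>
    let window := PySem.List.slice rest none (some ((rest.length : Int) - (m + 1) + 1))
    match PySem.List.max? window (fun x => x) with
    | none => []
    | some c =>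
      match PySem.List.index? window c with
      | none => []
      | some i => c :: altLoop (rest.drop (i + 1)) m

def maxSubseq_alt (s : String) (k : Int) : String :=
  let l := s.toList
  let keep : Nat := if k ≤ 0 then l.length else l.length - k.toNat
  String.ofList (altLoop l keep)

-- ===== PRECONDITION & SPEC =====
def Spec_maxSubseq (s : String) (k : Int) (out : String) : Prop := out = maxSubseq_alt s k
instance (s : String) (k : Int) (out : String) : Decidable (Spec_maxSubseq s k out) := by unfold Spec_maxSubseq; infer_instance

-- ===== CLAIM (what is proved, stated in full; the proofs are below) =====
def Claim_equal_maxSubseq : Prop := ∀ (s : String) (k : Int), Dom_maxSubseq s k → Spec_maxSubseq s k (maxSubseq s k)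

-- ===== LEMMAS AND PROOFS =====

-- list-level versions of the two ports
def Afn (l : List Char) (k : Int) : List Char :=
  let p := loopA [] k l
  if 0 < p.2 then PySem.List.slice p.1 none (some (-p.2)) else p.1

def bkeep (l : List Char) (k : Int) : Nat :=
  if k ≤ 0 then l.length else l.length - k.toNat

theorem maxSubseq_eq_Afn (s : String) (k : Int) :
    maxSubseq s k = String.ofList (Afn s.toList k) := rfl

theorem maxSubseq_alt_eq (s : String) (k : Int) :
    maxSubseq_alt s k = String.ofList (altLoop s.toList (bkeep s.toList k)) := rfl

theorem getLast?_cons_ne (st : List Char) (b : Char) (hne : st ≠ []) :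
    (b :: st).getLast? = st.getLast? := by
  cases st with
  | nil => exact absurd rfl hne
  | cons a t => exact List.getLast?_cons_cons

-- popW: result is a prefix, pops are counted by the budget, budget stays ≥ 0 (or untouched)
theorem popW_inv (res : List Char) (k : Int) (c : Char) :
    ((popW res k c).1 <+: res) ∧
    (k - (popW res k c).2 : Int) = res.length - (popW res k c).1.length ∧
    ((popW res k c).2 = k ∨ 0 ≤ (popW res k c).2) := by
  fun_induction popW res k c with
  | case1 res k hk x h hlt ih =>
    rcases ih with ⟨hpre, harith, hnn⟩
    refine ⟨hpre.trans (List.dropLast_prefix res), ?_, ?_⟩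
    · have hdl : (List.dropLast res).length = res.length - 1 := List.length_dropLast
      have hne : res ≠ [] := by intro hr; subst hr; simp at h
      have h1 : 1 ≤ res.length := List.length_pos_iff.mpr hne
      have hle := hpre.length_le
      rw [hdl] at harith hle
      omega
    · omega
  | case2 => simp
  | case3 => simp
  | case4 => simp

-- popW clears the whole stack when every element is smaller and the budget suffices
theorem popW_clear (res : List Char) (k : Int) (c : Char)
    (hall : ∀ x ∈ res, x < c) (hk : (res.length : Int) ≤ k) :
    popW res k c = ([], k - res.length) := by
  fun_induction popW res k c with
  | case1 res k hk' x h hlt ih =>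
    have hne : res ≠ [] := by intro hr; subst hr; simp at h
    have h1 : 1 ≤ res.length := List.length_pos_iff.mpr hne
    have hlen : (List.dropLast res).length = res.length - 1 := List.length_dropLast
    rw [ih (fun y hy => hall y (List.dropLast_subset res hy))
        (by rw [hlen]; omega)]
    rw [hlen]
    refine congrArg _ ?_
    omega
  | case2 res k hk' x h hlt =>
    exact absurd (hall x (List.mem_of_getLast? h)) hlt
  | case3 res k hk' h =>
    have hres : res = [] := by
      cases res with
      | nil => rfl
      | cons a t => simp at h
    subst hres; simp
  | case4 res k hk' =>
    have hres : res = [] := by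
      by_contra hne
      have h1 : 1 ≤ res.length := List.length_pos_iff.mpr hne
      have := hk
      omega
    subst hres; simp

-- popW never reaches a bottom element b unless the budget covers the whole stack above it
theorem popW_bottom (st : List Char) (k : Int) (c b : Char)
    (hb : b < c → k ≤ (st.length : Int)) :
    popW (b :: st) k c = (b :: (popW st k c).1, (popW st k c).2) := by
  fun_induction popW st k c with
  | case1 st k hk x h hlt ih =>
    have hne : st ≠ [] := by intro hr; subst hr; simp at h
    rw [popW]
    simp only [hk, if_pos]
    have hlast : (b :: st).getLast? = some x := by
      rw [getLast?_cons_ne st b hne]; exact h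
    rw [hlast]
    simp only [hlt, if_pos]
    have hdl : (b :: st).dropLast = b :: st.dropLast := by
      cases st with
      | nil => exact absurd rfl hne
      | cons a t => simp
    rw [hdl]
    apply ih
    intro hbc
    have h2 := hb hbc
    have h1 : 1 ≤ st.length := List.length_pos_iff.mpr hne
    have hlen : (List.dropLast st).length = st.length - 1 := List.length_dropLast
    rw [hlen]; omega
  | case2 st k hk x h hlt =>
    have hne : st ≠ [] := by intro hr; subst hr; simp at h
    conv_lhs => rw [popW]
    simp only [hk, if_pos]
    have hlast : (b :: st).getLast? = some x := by
      rw [getLast?_cons_ne st b hne]; exact h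
    rw [hlast]
    simp [hlt]
  | case3 st k hk h =>
    have hst : st = [] := by
      cases st with
      | nil => rfl
      | cons a t => simp at h
    subst hst
    conv_lhs => rw [popW]
    simp only [hk, if_pos]
    have hlast : ([b] : List Char).getLast? = some b := rfl
    rw [hlast]
    have hnb : ¬ b < c := by
      intro hbc
      have := hb hbc
      simp at this
      omega
    simp [hnb]
  | case4 st k hk =>
    conv_lhs => rw [popW]
    simp [hk]

-- loopA distributes over append
theorem loopA_append (xs ys : List Char) (st : List Char) (k : Int) :
    loopA st k (xs ++ ys) = loopA (loopA st k xs).1 (loopA st k xs).2 ys := by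
  induction xs generalizing st k with
  | nil => simp [loopA]
  | cons c cs ih => simp only [List.cons_append, loopA]; exact ih _ _

-- loopA invariant: stack length vs spent budget, budget sign, membership
theorem loopA_inv (xs : List Char) (st : List Char) (k : Int) :
    (((loopA st k xs).1.length : Int) = st.length + xs.length - (k - (loopA st k xs).2)) ∧
    ((loopA st k xs).2 = k ∨ 0 ≤ (loopA st k xs).2) ∧
    (∀ x ∈ (loopA st k xs).1, x ∈ st ∨ x ∈ xs) := by
  induction xs generalizing st k with
  | nil => simp [loopA]
  | cons c cs ih =>
    simp only [loopA]
    obtain ⟨hpre, harith, hsign⟩ := popW_inv st k c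
    obtain ⟨ih1, ih2, ih3⟩ := ih ((popW st k c).1 ++ [c]) (popW st k c).2
    have hlenle := hpre.length_le
    refine ⟨?_, ?_, ?_⟩
    · simp only [List.length_append, List.length_cons, List.length_nil] at ih1 ⊢
      push_cast at ih1 ⊢
      omega
    · rcases ih2 with h | h
      · rw [h]; rcases hsign with h' | h'
        · left; exact h'
        · right; exact h'
      · right; exact h
    · intro x hx
      rcases ih3 x hx with h | h
      · rcases List.mem_append.mp h with h' | h'
        · left; exact hpre.subset h'
        · right; simp at h'; simp [h']
      · right; simp [h]
  
-- the bottom element survives when every bigger later char comes too late for the budget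
theorem loopA_bottom (cs : List Char) (st : List Char) (k : Int) (b : Char)
    (H : ∀ j (hj : j < cs.length), b < cs[j] → (k : Int) ≤ st.length + j) :
    loopA (b :: st) k cs = (b :: (loopA st k cs).1, (loopA st k cs).2) := by
  induction cs generalizing st k with
  | nil => simp [loopA]
  | cons c cs ih =>
    simp only [loopA]
    have h0 : b < c → k ≤ (st.length : Int) := by
      intro hbc
      have := H 0 (by simp) (by simpa using hbc)
      simpa using this
    rw [popW_bottom st k c b h0]
    obtain ⟨hpre, harith, hsign⟩ := popW_inv st k c
    have hlenle := hpre.length_le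
    have : (b :: (popW st k c).1) ++ [c] = b :: ((popW st k c).1 ++ [c]) := by simp
    rw [this]
    apply ih
    intro j hj hbj
    have := H (j + 1) (by simpa using Nat.succ_lt_succ hj) (by simpa using hbj)
    simp only [List.length_append, List.length_cons]
    push_cast at this ⊢
    omega

-- a budget ≤ 0 never pops
theorem loopA_nopop (l : List Char) (st : List Char) (k : Int) (hk : k ≤ 0) :
    loopA st k l = (st ++ l, k) := by
  induction l generalizing st with
  | nil => simp [loopA]
  | cons c cs ih =>
    simp only [loopA]
    have : popW st k c = (st, k) := by
      rw [popW]; simp [show ¬ 0 < k by omega]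
    rw [this, ih]
    simp
    
-- keeping everything is the identity
theorem altLoop_id (l : List Char) : altLoop l l.length = l := by
  induction l with
  | nil => simp [altLoop]
  | cons c cs ih =>
    simp only [List.length_cons]
    rw [altLoop]
    have hw : PySem.List.slice (c :: cs) none (some (((c :: cs).length : Int) - (cs.length + 1) + 1)) = [c] := by
      have h1 : ((c :: cs).length : Int) - (cs.length + 1) + 1 = ((1 : Nat) : Int) := by
        simp only [List.length_cons]
        push_cast
        ring
      rw [h1, PySem.List.slice_to_natCast]
      simp
    simp only [List.length_cons] at *
    rw [hw]
    have hmax : PySem.List.max? [c] (fun x => x) = some c := by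
      simp [PySem.List.max?]
    rw [hmax]
    simp only [PySem.List.index?_cons_self]
    simpa using ih

-- one greedy step of A: the leftmost maximum of the first k+1 chars is emitted first
theorem Afn_step (l : List Char) (k : Int) (c : Char) (i : Nat)
    (h0 : 0 ≤ k) (h1 : k < (l.length : Int))
    (hc : PySem.List.max? (l.take (k.toNat + 1)) (fun x => x) = some c)
    (hi : PySem.List.index? (l.take (k.toNat + 1)) c = some i) :
    Afn l k = c :: Afn (l.drop (i + 1)) (k - i) := by
  have hklen : k.toNat + 1 ≤ l.length := by omega
  have hwlen : (l.take (k.toNat + 1)).length = k.toNat + 1 := by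
    simp [List.length_take]; omega
  obtain ⟨hilt, hwi, hprev⟩ := PySem.List.getElem_of_index?_eq_some hi
  rw [hwlen] at hilt
  have hik : i ≤ k.toNat := by omega
  have hil : i < l.length := by omega
  have hli : l[i] = c := by
    rw [← hwi]
    simp [List.getElem_take]
  have hdecomp : l = l.take i ++ c :: l.drop (i + 1) := by
    conv_lhs => rw [← List.take_append_drop i l]
    rw [List.drop_eq_getElem_cons hil, hli]
  have hpremax : ∀ x ∈ l.take i, x < c := by
    intro x hx
    obtain ⟨j, hj, hxj⟩ := List.mem_iff_getElem.mp hx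
    have hji : j < i := by
      have := hj
      simp [List.length_take] at this
      omega
    have hjl : j < l.length := by omega
    have hxlj : x = l[j] := by rw [← hxj]; simp [List.getElem_take]
    have hjw : j < (l.take (k.toNat + 1)).length := by omega
    have hwj : (l.take (k.toNat + 1))[j] = l[j] := by simp [List.getElem_take]
    have hne : l[j] ≠ c := by
      intro hcj
      exact hprev j (by omega) (by rw [hwj]; exact hcj)
    have hle : l[j] ≤ c := by
      have := PySem.List.max?_isMax hc (l.take (k.toNat + 1))[j] (List.getElem_mem hjw)
      rwa [hwj] at this
    rw [hxlj]
    exact lt_of_le_of_ne hle hne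
  -- after the prefix and the maximum, the stack is exactly [c] with budget k - i
  have hclear : loopA [] k l = loopA [c] (k - i) (l.drop (i + 1)) := by
    conv_lhs => rw [hdecomp]
    rw [loopA_append]
    obtain ⟨plen, psign, pmem⟩ := loopA_inv (l.take i) [] k
    have ptake : (l.take i).length = i := by simp [List.length_take]; omega
    rw [ptake] at plen
    simp only [List.length_nil] at plen
    have pmlt : ∀ x ∈ (loopA [] k (l.take i)).1, x < c := by
      intro x hx
      rcases pmem x hx with h | h
      · simp at h
      · exact hpremax x h
    rw [loopA]
    rw [popW_clear (loopA [] k (l.take i)).1 (loopA [] k (l.take i)).2 c pmlt (by omega)]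
    have harg : (loopA [] k (l.take i)).2 - ((loopA [] k (l.take i)).1.length : Int) = k - i := by
      omega
    rw [harg]
    simp
  -- the bottom element c survives the rest of the run
  have hbig : ∀ j (hj : j < (l.drop (i + 1)).length), c < (l.drop (i + 1))[j] →
      (k - i : Int) ≤ (([] : List Char).length : Int) + j := by
    intro j hj hcj
    by_contra hlt
    rw [not_le] at hlt
    simp only [List.length_nil] at hlt
    have hjk : (j : Int) < k - i := by omega
    have hjl : i + 1 + j < l.length := by
      have := hj
      simp [List.length_drop] at this
      omega
    have hjw : i + 1 + j < (l.take (k.toNat + 1)).length := by omega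
    have hdj : (l.drop (i + 1))[j] = l[i + 1 + j] := by
      simp [List.getElem_drop]
    have hwj : (l.take (k.toNat + 1))[i + 1 + j] = l[i + 1 + j] := by
      simp [List.getElem_take]
    have hle : l[i + 1 + j] ≤ c := by
      have := PySem.List.max?_isMax hc (l.take (k.toNat + 1))[i + 1 + j] (List.getElem_mem hjw)
      rwa [hwj] at this
    rw [hdj] at hcj
    exact absurd hcj (not_lt.mpr hle)
  have hbot := loopA_bottom (l.drop (i + 1)) [] (k - i) c hbig
  unfold Afn
  rw [hclear, hbot]
  obtain ⟨qlen, qsign, _⟩ := loopA_inv (l.drop (i + 1)) [] (k - i)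
  simp only [List.length_nil, List.length_drop] at qlen
  by_cases hq : 0 < (loopA [] (k - i) (l.drop (i + 1))).2
  · simp only [hq, if_pos]
    have ht : -(loopA [] (k - i) (l.drop (i + 1))).2 =
        -(((loopA [] (k - i) (l.drop (i + 1))).2.toNat : Nat) : Int) := by omega
    rw [ht, PySem.List.slice_to_neg_natCast _ _ (by omega),
        PySem.List.slice_to_neg_natCast _ _ (by omega)]
    have hle : (loopA [] (k - i) (l.drop (i + 1))).2.toNat ≤
        (loopA [] (k - i) (l.drop (i + 1))).1.length := by omega
    have hlen1 : (c :: (loopA [] (k - i) (l.drop (i + 1))).1).length -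
        (loopA [] (k - i) (l.drop (i + 1))).2.toNat =
        ((loopA [] (k - i) (l.drop (i + 1))).1.length -
         (loopA [] (k - i) (l.drop (i + 1))).2.toNat) + 1 := by
      simp only [List.length_cons]
      omega
    rw [hlen1, List.take_succ_cons]
  · simp [hq]

-- the two list-level programs agree
theorem Afn_eq_altLoop (n : Nat) : ∀ l : List Char, l.length = n → ∀ k : Int,
    Afn l k = altLoop l (bkeep l k) := by
  induction n using Nat.strong_induction_on with
  | _ n ih =>
    intro l hl k
    by_cases hk0 : k ≤ 0
    · have hA : Afn l k = l := by
        unfold Afn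
        rw [loopA_nopop l [] k hk0]
        simp [show ¬ (0 : Int) < k by omega]
      rw [hA, bkeep, if_pos hk0, altLoop_id]
    · rw [not_le] at hk0
      by_cases hkn : (l.length : Int) ≤ k
      · have hb : bkeep l k = 0 := by
          unfold bkeep
          rw [if_neg (by omega)]
          omega
        rw [hb]
        show Afn l k = []
        unfold Afn
        obtain ⟨alen, asign, _⟩ := loopA_inv l [] k
        simp only [List.length_nil] at alen
        by_cases hp : 0 < (loopA [] k l).2
        · simp only [hp, if_pos]
          have ht : -(loopA [] k l).2 = -(((loopA [] k l).2.toNat : Nat) : Int) := by omega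
          rw [ht, PySem.List.slice_to_neg_natCast _ _ (by omega)]
          have h0 : (loopA [] k l).1.length - (loopA [] k l).2.toNat = 0 := by omega
          rw [h0, List.take_zero]
        · simp only [hp, if_false]
          have hp2 : (loopA [] k l).2 = 0 := by
            rcases asign with h | h
            · omega
            · omega
          have : (loopA [] k l).1.length = 0 := by omega
          exact List.length_eq_zero_iff.mp this
      · rw [not_le] at hkn
        have hkl : k.toNat + 1 ≤ l.length := by omega
        have hm : bkeep l k = (l.length - k.toNat - 1) + 1 := by
          unfold bkeep
          rw [if_neg (by omega)]
          omega
        rw [hm, altLoop]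
        have hwin : PySem.List.slice l none
            (some ((l.length : Int) - ((l.length - k.toNat - 1 : Nat) + 1) + 1)) =
            l.take (k.toNat + 1) := by
          have harg : ((l.length : Int) - ((l.length - k.toNat - 1 : Nat) + 1) + 1) =
              ((k.toNat + 1 : Nat) : Int) := by push_cast; omega
          rw [harg, PySem.List.slice_to_natCast]
        rw [hwin]
        have hwlen0 : (l.take (k.toNat + 1)).length = k.toNat + 1 := by
          simp [List.length_take]; omega
        have hwne : l.take (k.toNat + 1) ≠ [] := by
          intro h
          rw [h] at hwlen0
          simp at hwlen0
        obtain ⟨c, hc⟩ : ∃ c, PySem.List.max? (l.take (k.toNat + 1)) (fun x => x) = some c := by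
          cases hmx : PySem.List.max? (l.take (k.toNat + 1)) (fun x => x) with
          | none =>
            rw [PySem.List.max?_eq_none_iff] at hmx
            exact absurd hmx hwne
          | some c => exact ⟨c, rfl⟩
        obtain ⟨i, hi⟩ : ∃ i, PySem.List.index? (l.take (k.toNat + 1)) c = some i := by
          have hmem : c ∈ l.take (k.toNat + 1) := PySem.List.max?_mem hc
          have hs : (PySem.List.index? (l.take (k.toNat + 1)) c).isSome := by
            rw [PySem.List.index?_isSome_iff]
            exact hmem
          exact Option.isSome_iff_exists.mp hs
        rw [hc]
        simp only [hi]
        obtain ⟨hilt, hwi, hprev⟩ := PySem.List.getElem_of_index?_eq_some hi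
        have hwlen : (l.take (k.toNat + 1)).length = k.toNat + 1 := by
          simp [List.length_take]; omega
        rw [hwlen] at hilt
        rw [Afn_step l k c i (by omega) (by omega) hc hi]
        congr 1
        have hdl : (l.drop (i + 1)).length = l.length - (i + 1) := by
          simp [List.length_drop]
        have hlt : (l.drop (i + 1)).length < n := by omega
        rw [ih _ (by omega) _ rfl (k - i)]
        congr 1
        unfold bkeep
        split_ifs with h
        · rw [hdl]; omega
        · rw [hdl]; omega

-- ===== VERDICT (by name: the statement is the Claim_ definition above) =====
theorem maxSubseq_spec : Claim_equal_maxSubseq := by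
  intro s k _
  unfold Spec_maxSubseq
  rw [maxSubseq_eq_Afn, maxSubseq_alt_eq, Afn_eq_altLoop s.toList.length s.toList rfl k]
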